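-- pv_equiv track=rewrite | github.com/JojoN0tFound/rubik | optimization.py | _removeTwoMovement
-- ===== SOURCE A (Python) =====
-- def _removeTwoMovement(tmp):
-- 	newLst = []
-- 	i = 0
-- 	restart = False
-- 	while i < len(tmp):
-- 		if(i + 2 <= len(tmp) and tmp[i] == tmp[i + 1]):
-- 			newLst.append(tmp[i] + "2")
-- 			i += 2
-- 			restart = True
-- 		else:
-- 			newLst.append(tmp[i])
-- 			i += 1
-- 	return _removeTwoMovement(newLst) if restart else newLst
-- ===== SOURCE B (Python) =====
-- # Same fixpoint, but each pass groups the list into runs of equal tokens and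
-- # emits k//2 doubled tokens plus the parity leftover per run (iterative, run-based).
-- def _removeTwoMovement(tmp):
-- 	cur = list(tmp)
-- 	changed = True
-- 	while changed:
-- 		changed = False
-- 		out = []
-- 		i = 0
-- 		n = len(cur)
-- 		while i < n:
-- 			j = i + 1
-- 			while j < n and cur[j] == cur[i]:
-- 				j += 1
-- 			k = j - i
-- 			if k >= 2:
-- 				changed = True
-- 			out.extend([cur[i] + "2"] * (k // 2))
-- 			if k % 2:
-- 				out.append(cur[i])
-- 			i = j
-- 		cur = out
-- 	return cur
-- ===== Notes on version B (the rewrite author's own statement) =====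
-- stated objective: alternative
-- what changed: Replaces A's index-stepping pair-collapsing recursion with an iterative fixpoint whose pass groups the list into maximal runs of equal tokens and emits k//2 doubled tokens plus the parity leftover per run in bulk.
import Mathlib
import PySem

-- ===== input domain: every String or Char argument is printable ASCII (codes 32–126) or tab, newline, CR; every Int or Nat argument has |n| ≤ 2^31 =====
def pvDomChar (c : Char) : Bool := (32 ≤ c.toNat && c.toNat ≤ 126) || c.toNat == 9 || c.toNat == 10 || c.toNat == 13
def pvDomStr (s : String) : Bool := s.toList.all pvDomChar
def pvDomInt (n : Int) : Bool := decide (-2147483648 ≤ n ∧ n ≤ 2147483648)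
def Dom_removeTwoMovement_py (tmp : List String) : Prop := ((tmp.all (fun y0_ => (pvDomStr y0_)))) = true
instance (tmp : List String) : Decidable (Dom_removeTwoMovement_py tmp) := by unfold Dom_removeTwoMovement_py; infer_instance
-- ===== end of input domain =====

-- B is an alternative decomposition of the same computation (run-length grouping per pass,
-- iterative fixpoint) with the same cost; equivalence of return values is proved below.

-- ===== PORT A =====
-- one left-to-right pass of A's while loop: pairs adjacent equal tokens, returns (newLst, restart)
def pvPassA : List String → List String × Bool
  | [] => ([], false)
  | [x] => ([x], false)
  | x :: y :: rest =>
      if x == y then ((x ++ "2") :: (pvPassA rest).1, true)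
      else (x :: (pvPassA (y :: rest)).1, (pvPassA (y :: rest)).2)
  termination_by l => l.length
  decreasing_by all_goals simp

theorem pvPassA_le : ∀ l : List String, (pvPassA l).1.length ≤ l.length
  | [] => by simp [pvPassA]
  | [x] => by simp [pvPassA]
  | x :: y :: rest => by
      by_cases h : x == y
      · have := pvPassA_le rest
        simp [pvPassA, h]; omega
      · have := pvPassA_le (y :: rest)
        simp only [pvPassA, h, Bool.false_eq_true, if_false]
        simp at this ⊢; omega
  termination_by l => l.length
  decreasing_by all_goals simp

theorem pvPassA_lt : ∀ l : List String, (pvPassA l).2 = true → (pvPassA l).1.length < l.length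
  | [], h => by simp [pvPassA] at h
  | [x], h => by simp [pvPassA] at h
  | x :: y :: rest, h => by
      by_cases hxy : x == y
      · have := pvPassA_le rest
        simp [pvPassA, hxy]; omega
      · simp only [pvPassA, hxy, Bool.false_eq_true, if_false] at h ⊢
        have := pvPassA_lt (y :: rest) h
        simp at this ⊢; omega
  termination_by l => l.length
  decreasing_by all_goals simp

-- A: pass, then recurse on the result iff restart was set
def removeTwoMovement_py (tmp : List String) : List String :=
  let p := pvPassA tmp
  if h : p.2 = true then removeTwoMovement_py p.1 else p.1
  termination_by tmp.length
  decreasing_by exact pvPassA_lt tmp h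

-- ===== PORT B =====
-- scan the leading run equal to x: (number of equal elements consumed, remainder)
def pvRun (x : String) : List String → Nat × List String
  | [] => (0, [])
  | y :: t => if y == x then ((pvRun x t).1 + 1, (pvRun x t).2) else (0, y :: t)

theorem pvRun_spec (x : String) : ∀ l : List String, (pvRun x l).1 + (pvRun x l).2.length = l.length
  | [] => by simp [pvRun]
  | y :: t => by
      by_cases h : y == x
      · have := pvRun_spec x t
        simp [pvRun, h]; omega
      · simp [pvRun, h]

-- one pass of B's outer while loop: per run of length k, emit k/2 doubled tokens and the parity leftover
def pvPassB : List String → List String × Bool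
  | [] => ([], false)
  | x :: rest =>
      (List.replicate (((pvRun x rest).1 + 1) / 2) (x ++ "2") ++
        (if ((pvRun x rest).1 + 1) % 2 = 1 then [x] else []) ++ (pvPassB (pvRun x rest).2).1,
        (decide (2 ≤ (pvRun x rest).1 + 1) || (pvPassB (pvRun x rest).2).2))
  termination_by l => l.length
  decreasing_by
    have := pvRun_spec x rest
    simp; omega

theorem pvPassB_le : ∀ l : List String, (pvPassB l).1.length ≤ l.length
  | [] => by simp [pvPassB]
  | x :: rest => by
      have hr := pvRun_spec x rest
      have ht := pvPassB_le (pvRun x rest).2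
      simp [pvPassB]
      split <;> simp <;> omega
  termination_by l => l.length
  decreasing_by
    have := pvRun_spec x rest
    simp; omega

theorem pvPassB_lt : ∀ l : List String, (pvPassB l).2 = true → (pvPassB l).1.length < l.length
  | [], h => by simp [pvPassB] at h
  | x :: rest, h => by
      have hr := pvRun_spec x rest
      have ht := pvPassB_le (pvRun x rest).2
      simp [pvPassB] at h ⊢
      rcases h with h | h
      · split <;> simp <;> omega
      · have := pvPassB_lt (pvRun x rest).2 h
        split <;> simp <;> omega
  termination_by l => l.length
  decreasing_by
    have := pvRun_spec x rest
    simp; omega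

-- B: iterate the run-based pass until no run had length ≥ 2
def removeTwoMovement_py_alt (tmp : List String) : List String :=
  let p := pvPassB tmp
  if h : p.2 = true then removeTwoMovement_py_alt p.1 else p.1
  termination_by tmp.length
  decreasing_by exact pvPassB_lt tmp h

-- ===== PRECONDITION & SPEC =====
def Spec_removeTwoMovement_py (tmp : List String) (out : List String) : Prop := out = removeTwoMovement_py_alt tmp
instance (tmp : List String) (out : List String) : Decidable (Spec_removeTwoMovement_py tmp out) := by unfold Spec_removeTwoMovement_py; infer_instance

-- ===== CLAIM (what is proved, stated in full; the proofs are below) =====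
def Claim_equal_removeTwoMovement_py : Prop := ∀ (tmp : List String), Dom_removeTwoMovement_py tmp → Spec_removeTwoMovement_py tmp (removeTwoMovement_py tmp)

-- ===== LEMMAS AND PROOFS =====

theorem pvPassB_pair (x : String) (rest : List String) :
    pvPassB (x :: x :: rest) = ((x ++ "2") :: (pvPassB rest).1, true) := by
  cases rest with
  | nil => simp [pvPassB, pvRun]
  | cons y t =>
      by_cases h : y == x
      · have hy : y = x := by simpa using h
        subst hy
        have h2 : ((pvRun y t).1 + 1 + 1 + 1) / 2 = ((pvRun y t).1 + 1) / 2 + 1 := by omega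
        have h3 : ((pvRun y t).1 + 1 + 1 + 1) % 2 = ((pvRun y t).1 + 1) % 2 := by omega
        simp [pvPassB, pvRun, h2, h3, List.replicate_succ]
      · simp [pvPassB, pvRun, h]

theorem pvPassB_ne (x y : String) (rest : List String) (h : ¬ x == y) :
    pvPassB (x :: y :: rest) = (x :: (pvPassB (y :: rest)).1, (pvPassB (y :: rest)).2) := by
  have h' : ¬ y == x := by simp at h ⊢; exact fun e => h e.symm
  simp [pvPassB, pvRun, h']

theorem pvPassAB : ∀ l : List String, pvPassA l = pvPassB l
  | [] => by simp [pvPassA, pvPassB]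
  | [x] => by simp [pvPassA, pvPassB, pvRun]
  | x :: y :: rest => by
      by_cases h : x == y
      · have hy : x = y := by simpa using h
        subst hy
        rw [pvPassB_pair]
        have := pvPassAB rest
        simp [pvPassA, this]
      · rw [pvPassB_ne x y rest h]
        have := pvPassAB (y :: rest)
        simp [pvPassA, h, this]
  termination_by l => l.length
  decreasing_by all_goals simp

theorem pvAB : ∀ tmp : List String, removeTwoMovement_py tmp = removeTwoMovement_py_alt tmp
  | tmp => by
      rw [removeTwoMovement_py, removeTwoMovement_py_alt]
      simp only [pvPassAB]
      split
      · exact pvAB (pvPassB tmp).1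
      · rfl
  termination_by tmp => tmp.length
  decreasing_by
    have h : (pvPassB tmp).2 = true := by assumption
    exact pvPassB_lt tmp h

-- ===== VERDICT (by name: the statement is the Claim_ definition above) =====
theorem removeTwoMovement_py_spec : Claim_equal_removeTwoMovement_py := by
  intro tmp _
  unfold Spec_removeTwoMovement_py
  exact pvAB tmp
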